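-- pv_equiv track=rewrite | github.com/hkgkhanh/15-puzzle-solver | utils.py | move_sequence
-- ===== SOURCE A (Python) =====
-- def move_sequence(board, target_pos, zero_pos):
--     """ Dịch chuyển ô trống đến vị trí cần thiết trước khi di chuyển một ô khác """
--     path = []
--     zx, zy = zero_pos
--     tx, ty = target_pos
--
--     while zx != tx or zy != ty:
--         if zx < tx:
--             zx += 1
--             path.append("↑")  # Ô trống di chuyển xuống -> số di chuyển lên
--         elif zx > tx:
--             zx -= 1
--             path.append("↓")  # Ô trống di chuyển lên -> số di chuyển xuống
--         elif zy < ty: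
--             zy += 1
--             path.append("←")  # Ô trống di chuyển phải -> số di chuyển trái
--         elif zy > ty:
--             zy -= 1
--             path.append("→")  # Ô trống di chuyển trái -> số di chuyển phải
--     return path
-- ===== SOURCE B (Python) =====
-- def move_sequence(board, target_pos, zero_pos):
--     """Closed form: count each direction symbol directly from the deltas."""
--     zx, zy = zero_pos
--     tx, ty = target_pos
--     dx = tx - zx
--     dy = ty - zy
--     vert = ["↑"] * dx if dx > 0 else ["↓"] * (-dx)
--     horiz = ["←"] * dy if dy > 0 else ["→"] * (-dy)
--     return vert + horiz
-- ===== Notes on version B (the rewrite author's own statement) =====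
-- stated objective: faster
-- what changed: Replaced the one-step-at-a-time while loop with a closed form that builds each direction segment by list multiplication from the signed deltas.
import Mathlib
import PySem

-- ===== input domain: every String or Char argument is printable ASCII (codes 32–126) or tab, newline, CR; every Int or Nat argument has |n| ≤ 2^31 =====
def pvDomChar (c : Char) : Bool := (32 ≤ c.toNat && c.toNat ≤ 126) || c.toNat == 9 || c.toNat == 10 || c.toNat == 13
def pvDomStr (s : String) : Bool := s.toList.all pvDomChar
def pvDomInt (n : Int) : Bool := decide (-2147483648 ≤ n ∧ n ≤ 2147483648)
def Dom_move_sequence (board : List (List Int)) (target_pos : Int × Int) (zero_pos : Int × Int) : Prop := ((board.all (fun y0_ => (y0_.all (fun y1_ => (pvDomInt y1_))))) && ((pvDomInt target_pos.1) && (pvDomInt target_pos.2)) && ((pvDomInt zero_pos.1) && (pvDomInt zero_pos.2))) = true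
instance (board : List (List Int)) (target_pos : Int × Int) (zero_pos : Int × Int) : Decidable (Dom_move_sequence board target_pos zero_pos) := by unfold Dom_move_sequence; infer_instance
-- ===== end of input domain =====

-- B replaces A's step-by-step while loop with a closed form: each direction
-- segment is produced at once by List.replicate from the signed deltas (objective: faster by constant factor).

-- ===== PORT A =====
-- the while loop of A: state (zx, zy), stepping one cell per iteration
def msLoopA (tx ty zx zy : Int) : List String :=
  if zx ≠ tx ∨ zy ≠ ty then
    if zx < tx then "↑" :: msLoopA tx ty (zx + 1) zy
    else if zx > tx then "↓" :: msLoopA tx ty (zx - 1) zy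
    else if zy < ty then "←" :: msLoopA tx ty zx (zy + 1)
    else if zy > ty then "→" :: msLoopA tx ty zx (zy - 1)
    else []   -- unreachable for Int state: the loop condition forces one branch
  else []
termination_by (tx - zx).natAbs + (ty - zy).natAbs
decreasing_by all_goals omega

def move_sequence (board : List (List Int)) (target_pos : Int × Int) (zero_pos : Int × Int) : List String :=
  msLoopA target_pos.1 target_pos.2 zero_pos.1 zero_pos.2

-- ===== PORT B =====
def move_sequence_alt (board : List (List Int)) (target_pos : Int × Int) (zero_pos : Int × Int) : List String :=
  let dx := target_pos.1 - zero_pos.1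
  let dy := target_pos.2 - zero_pos.2
  (if dx > 0 then List.replicate dx.toNat "↑" else List.replicate (-dx).toNat "↓")
  ++ (if dy > 0 then List.replicate dy.toNat "←" else List.replicate (-dy).toNat "→")

-- ===== PRECONDITION & SPEC =====
def Spec_move_sequence (board : List (List Int)) (target_pos : Int × Int) (zero_pos : Int × Int) (out : List String) : Prop := out = move_sequence_alt board target_pos zero_pos
instance (board : List (List Int)) (target_pos : Int × Int) (zero_pos : Int × Int) (out : List String) : Decidable (Spec_move_sequence board target_pos zero_pos out) := by unfold Spec_move_sequence; infer_instance

-- ===== CLAIM (what is proved, stated in full; the proofs are below) =====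
def Claim_equal_move_sequence : Prop := ∀ (board : List (List Int)) (target_pos : Int × Int) (zero_pos : Int × Int), Dom_move_sequence board target_pos zero_pos → Spec_move_sequence board target_pos zero_pos (move_sequence board target_pos zero_pos)

-- ===== LEMMAS AND PROOFS =====
lemma msLoopA_eq (tx ty zx zy : Int) :
    msLoopA tx ty zx zy =
      (if tx - zx > 0 then List.replicate (tx - zx).toNat "↑" else List.replicate (-(tx - zx)).toNat "↓")
      ++ (if ty - zy > 0 then List.replicate (ty - zy).toNat "←" else List.replicate (-(ty - zy)).toNat "→") := by
  have h : ∀ n : ℕ, ∀ zx zy : Int, (tx - zx).natAbs + (ty - zy).natAbs = n →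
      msLoopA tx ty zx zy =
        (if tx - zx > 0 then List.replicate (tx - zx).toNat "↑" else List.replicate (-(tx - zx)).toNat "↓")
        ++ (if ty - zy > 0 then List.replicate (ty - zy).toNat "←" else List.replicate (-(ty - zy)).toNat "→") := by
    intro n
    induction n using Nat.strong_induction_on with
    | _ n ih =>
      intro zx zy hn
      rw [msLoopA]
      by_cases hx : zx = tx
      · by_cases hy : zy = ty
        · subst hx; subst hy; simp
        · simp only [hx, ne_eq, not_true_eq_false, hy, not_false_eq_true, or_true, if_true,
            lt_irrefl, gt_iff_lt, if_false]
          by_cases hlt : zy < ty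
          · simp only [hlt, if_true]
            rw [ih ((tx - tx).natAbs + (ty - (zy + 1)).natAbs) (by omega) tx (zy + 1) rfl]
            have h1 : ¬ tx - tx > 0 := by omega
            have h2 : (-(tx - tx)).toNat = 0 := by omega
            have h3 : ty - zy > 0 := by omega
            have h4 : ty - (zy + 1) > 0 ∨ ty - (zy + 1) = 0 := by omega
            simp only [h1, if_false, h2, List.replicate_zero, List.nil_append, h3, if_true]
            rcases h4 with h4 | h4
            · simp only [h4, if_true]
              have : (ty - zy).toNat = (ty - (zy + 1)).toNat + 1 := by omega
              rw [this, List.replicate_succ]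
            · have h5 : ¬ ty - (zy + 1) > 0 := by omega
              have h6 : (-(ty - (zy + 1))).toNat = 0 := by omega
              have h7 : (ty - zy).toNat = 1 := by omega
              have h8 : ¬ zy + 1 < ty := by omega
              have h9 : (zy + 1 - ty).toNat = 0 := by omega
              simp [h7, h8, h9]
          · have hgt : zy > ty := by omega
            simp only [hlt, if_false, hgt, if_true]
            rw [ih ((tx - tx).natAbs + (ty - (zy - 1)).natAbs) (by omega) tx (zy - 1) rfl]
            have h1 : ¬ tx - tx > 0 := by omega
            have h2 : (-(tx - tx)).toNat = 0 := by omega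
            have h3 : ¬ ty - zy > 0 := by omega
            have h5 : ¬ ty - (zy - 1) > 0 := by omega
            have h6 : (-(ty - zy)).toNat = (-(ty - (zy - 1))).toNat + 1 := by omega
            simp only [h1, if_false, h2, List.replicate_zero, List.nil_append, h3, h5, h6,
              List.replicate_succ]
      · by_cases hlt : zx < tx
        · simp only [ne_eq, hx, not_false_eq_true, true_or, if_true, hlt]
          rw [ih ((tx - (zx + 1)).natAbs + (ty - zy).natAbs) (by omega) (zx + 1) zy rfl]
          have h3 : tx - zx > 0 := by omega
          have h4 : tx - (zx + 1) > 0 ∨ tx - (zx + 1) = 0 := by omega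
          simp only [gt_iff_lt, h3, if_true]
          rcases h4 with h4 | h4
          · simp only [h4, if_true]
            have : (tx - zx).toNat = (tx - (zx + 1)).toNat + 1 := by omega
            rw [this, List.replicate_succ, List.cons_append]
          · have h5 : ¬ tx - (zx + 1) > 0 := by omega
            have h6 : (-(tx - (zx + 1))).toNat = 0 := by omega
            have h7 : (tx - zx).toNat = 1 := by omega
            have h8 : ¬ zx + 1 < tx := by omega
            have h9 : (zx + 1 - tx).toNat = 0 := by omega
            simp [h7, h8, h9]
        · have hgt : zx > tx := by omega
          simp only [ne_eq, hx, not_false_eq_true, true_or, if_true, hlt, if_false, hgt]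
          rw [ih ((tx - (zx - 1)).natAbs + (ty - zy).natAbs) (by omega) (zx - 1) zy rfl]
          have h3 : ¬ tx - zx > 0 := by omega
          have h5 : ¬ tx - (zx - 1) > 0 := by omega
          have h6 : (-(tx - zx)).toNat = (-(tx - (zx - 1))).toNat + 1 := by omega
          simp only [gt_iff_lt, h3, if_false, h5, h6, List.replicate_succ, List.cons_append]
  exact h _ zx zy rfl

-- ===== VERDICT (by name: the statement is the Claim_ definition above) =====
theorem move_sequence_spec : Claim_equal_move_sequence := by
  intro board tp zp _
  unfold Spec_move_sequence move_sequence move_sequence_alt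
  exact msLoopA_eq tp.1 tp.2 zp.1 zp.2
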